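-- pv_equiv track=rewrite | github.com/all-in-one-of/icarus | core/libs/shared/appLauncher.py | getRows
-- ===== SOURCE A (Python) =====
-- import math
--
-- def getRows(num_items):
-- 	""" Calculate icon grid arrangement.
-- 		Returns an integer list with each item representing the number of
-- 		icons in each row.
-- 		N.B. Weird syntax here is to maintain compatibility due to the
-- 		different ways Python 2.x and 3.x handle division between integers
-- 		and floats.
-- 	"""
-- 	# Specify some thresholds at which we cascade on to another row. In
-- 	# this instance it's hardcoded that we increase the number of rows
-- 	# after 4, 10, and thereafter every additional 5 items. There will
-- 	# never be more than 5 items in a row.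
-- 	if num_items <= 4:
-- 		num_rows = 1
-- 	elif num_items <= 10:
-- 		num_rows = 2
-- 	else:
-- 		num_rows = int(math.ceil(num_items/5.0))
--
-- 	max_items_per_row = int(math.ceil(num_items/(num_rows*1.0)))
--
-- 	# Create list of rows each holding an integer value representing the
-- 	# number of items in each row.
-- 	rows = []
-- 	for i in range(num_rows):
-- 		rows.append(max_items_per_row)
--
-- 	# Progressively reduce items per row until we have the correct total
-- 	# number of items.
-- 	i = 0
-- 	while sum(rows) > num_items:
-- 		rows[i] -= 1
-- 		i += 1
--
-- 	# Sort the rows so that the rows with the fewest items appear first,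
-- 	# then return the list.
-- 	rows.sort()
-- 	return rows
-- ===== SOURCE B (Python) =====
-- def getRows(num_items):
--     """Closed-form O(n... rows) version: compute the excess directly and
--     emit excess rows of max-1 followed by the rest of max."""
--     if num_items <= 4:
--         num_rows = 1
--     elif num_items <= 10:
--         num_rows = 2
--     else:
--         num_rows = -(-num_items // 5)          # integer ceil division
--     max_per = -(-num_items // num_rows)        # integer ceil division
--     excess = num_rows * max_per - num_items    # 0 <= excess < num_rows
--     return [max_per - 1] * excess + [max_per] * (num_rows - excess)
-- ===== Notes on version B (the rewrite author's own statement) =====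
-- stated objective: faster
-- what changed: Replaces the build-then-decrement-then-sort loops (quadratic: the while loop re-sums the list every iteration) with a closed form: compute excess = num_rows*max - num_items and emit excess rows of max-1 followed by the rest of max, already in sorted order.
import Mathlib
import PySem

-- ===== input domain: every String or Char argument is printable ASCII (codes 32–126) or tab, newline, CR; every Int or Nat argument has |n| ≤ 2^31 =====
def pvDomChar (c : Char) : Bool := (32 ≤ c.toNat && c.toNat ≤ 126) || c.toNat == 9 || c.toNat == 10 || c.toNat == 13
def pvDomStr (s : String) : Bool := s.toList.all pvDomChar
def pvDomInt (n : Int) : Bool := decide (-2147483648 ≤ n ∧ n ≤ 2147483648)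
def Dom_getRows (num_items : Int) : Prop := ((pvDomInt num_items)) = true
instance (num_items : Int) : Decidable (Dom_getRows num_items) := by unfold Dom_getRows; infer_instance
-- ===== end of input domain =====

-- B replaces A's build/decrement/sort loops by a closed form (excess rows of max-1,
-- then rows of max, already in sorted order); proved equal to A on all of Dom.


-- ===== PORT A =====
-- int(math.ceil(a/b)) for positive b, ported as the exact integer ceiling -((-a)//b):
-- exact on Dom (|n| ≤ 2^31 < 2^53, so the float quotient never crosses an integer).
def pvCeil (a b : Int) : Int := -(PySem.Int.floordiv (-a) b)

-- the 'while sum(rows) > num_items' loop; fuel = number of iterations the Python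
-- loop performs (sum(rows) - num_items at entry, each iteration decreases sum by 1)
def getRowsWhile (num_items : Int) (rows : List Int) (i : Nat) (fuel : Nat) : List Int :=
  match fuel with
  | 0 => rows
  | fuel + 1 =>
    if rows.sum > num_items then
      getRowsWhile num_items (rows.set i (rows[i]! - 1)) (i + 1) fuel
    else rows

def getRows (num_items : Int) : List Int :=
  let num_rows : Int :=
    if num_items ≤ 4 then 1
    else if num_items ≤ 10 then 2
    else pvCeil num_items 5
  let max_items_per_row : Int := pvCeil num_items num_rows
  -- for i in range(num_rows): rows.append(max_items_per_row)
  let rows := (PySem.List.pyRange 0 num_rows 1).foldl (fun acc _ => acc ++ [max_items_per_row]) []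
  let rows := getRowsWhile num_items rows 0 (num_rows * max_items_per_row - num_items).toNat
  PySem.List.sorted rows (fun x => x) false

-- ===== PORT B =====
def getRows_alt (num_items : Int) : List Int :=
  let num_rows : Int :=
    if num_items ≤ 4 then 1
    else if num_items ≤ 10 then 2
    else -(PySem.Int.floordiv (-num_items) 5)
  let max_per : Int := -(PySem.Int.floordiv (-num_items) num_rows)
  let excess : Int := num_rows * max_per - num_items
  List.replicate excess.toNat (max_per - 1) ++ List.replicate (num_rows - excess).toNat max_per

-- ===== PRECONDITION & SPEC =====
def Spec_getRows (num_items : Int) (out : List Int) : Prop := out = getRows_alt num_items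
instance (num_items : Int) (out : List Int) : Decidable (Spec_getRows num_items out) := by unfold Spec_getRows; infer_instance

-- ===== CLAIM (what is proved, stated in full; the proofs are below) =====
def Claim_equal_getRows : Prop := ∀ (num_items : Int), Dom_getRows num_items → Spec_getRows num_items (getRows num_items)

-- ===== LEMMAS AND PROOFS =====

-- the append-in-a-loop builds a replicate
theorem foldl_append_replicate (m : Int) :
    ∀ (l : List Int) (acc : List Int),
      l.foldl (fun a _ => a ++ [m]) acc = acc ++ List.replicate l.length m := by
  intro l
  induction l with
  | nil => intro acc; simp
  | cons x t ih => intro acc; simp [List.foldl, ih, List.replicate_succ]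

-- one decrement step: element i of (replicate i a ++ m :: rest) is m, and setting it gives a
theorem getElem!_repl_mid (i : Nat) (a m : Int) (rest : List Int) :
    (List.replicate i a ++ m :: rest)[i]! = m := by
  have h : (List.replicate i a ++ m :: rest)[i]? = some m := by
    rw [List.getElem?_append_right (by simp)]
    simp
  rw [List.getElem!_eq_getElem?_getD, h]
  rfl

theorem set_repl_mid (i : Nat) (a m x : Int) (rest : List Int) :
    (List.replicate i a ++ m :: rest).set i x = List.replicate i a ++ x :: rest := by
  rw [List.set_append_right _ _ (by simp)]
  simp

-- the while loop, run for `fuel` more iterations, from the invariant state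
theorem getRowsWhile_eq (n m : Int) :
    ∀ (fuel i r : Nat), fuel + i ≤ r → (r : Int) * m - n = ((fuel + i : Nat) : Int) →
      getRowsWhile n (List.replicate i (m - 1) ++ List.replicate (r - i) m) i fuel
        = List.replicate (fuel + i) (m - 1) ++ List.replicate (r - (fuel + i)) m := by
  intro fuel
  induction fuel with
  | zero => intro i r _ _; simp [getRowsWhile]
  | succ f ih =>
    intro i r hle hsum
    have hir : i < r := by omega
    have hsplit : r - i = (r - i - 1) + 1 := by omega
    have hcond : (List.replicate i (m - 1) ++ List.replicate (r - i) m).sum > n := by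
      have : (List.replicate i (m - 1) ++ List.replicate (r - i) m).sum
          = (i : Int) * (m - 1) + ((r - i : Nat) : Int) * m := by
        simp [List.sum_replicate]
      rw [this]
      have hcast : ((r - i : Nat) : Int) = (r : Int) - (i : Int) := by omega
      rw [hcast]
      have : ((f + 1 + i : Nat) : Int) = (f : Int) + 1 + (i : Int) := by push_cast; ring
      rw [this] at hsum
      nlinarith [hsum]
    rw [getRowsWhile, if_pos hcond, hsplit, List.replicate_succ,
        getElem!_repl_mid i (m - 1) m, set_repl_mid i (m - 1) m (m - 1)]
    have hcons : List.replicate i (m - 1) ++ (m - 1) :: List.replicate (r - i - 1) m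
        = List.replicate (i + 1) (m - 1) ++ List.replicate (r - (i + 1)) m := by
      rw [List.replicate_succ' (n := i)]
      simp only [List.append_assoc, List.cons_append, List.nil_append]
      congr 2
    rw [hcons]
    have h1 : f + (i + 1) ≤ r := by omega
    have h2 : (r : Int) * m - n = ((f + (i + 1) : Nat) : Int) := by
      rw [hsum]; omega
    have := ih (i + 1) r h1 h2
    rw [this]
    congr 2
    all_goals omega

-- ceiling division: for 0 < r, q = -((-n)//r) satisfies (q-1)*r < n ≤ q*r
theorem pvCeil_bounds (n r : Int) (hr : 0 < r) :
    (pvCeil n r - 1) * r < n ∧ n ≤ pvCeil n r * r := by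
  have := (PySem.Int.neg_floordiv_neg_eq_iff_of_pos (a := n) (b := r) (q := pvCeil n r) hr).mp rfl
  exact this

-- the closed-form list is already nondecreasing, so sorting it is the identity
theorem sorted_two_blocks (e k : Nat) (m : Int) :
    PySem.List.sorted (List.replicate e (m - 1) ++ List.replicate k m) (fun x => x) false
      = List.replicate e (m - 1) ++ List.replicate k m := by
  apply PySem.List.sorted_eq_self_of_pairwise
  rw [List.pairwise_append]
  refine ⟨List.pairwise_replicate.mpr ?_, List.pairwise_replicate.mpr ?_, ?_⟩
  · right; omega
  · right; omega
  · intro a ha b hb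
    have ha' := List.eq_of_mem_replicate ha
    have hb' := List.eq_of_mem_replicate hb
    subst ha'; subst hb'; omega

-- core equality, for any positive row count r (both sides after fixing num_rows = r)
theorem getRows_core (n r : Int) (hr : 0 < r) :
    PySem.List.sorted
      (getRowsWhile n
        ((PySem.List.pyRange 0 r 1).foldl (fun acc _ => acc ++ [pvCeil n r]) [])
        0 (r * pvCeil n r - n).toNat)
      (fun x => x) false
    = List.replicate (r * pvCeil n r - n).toNat (pvCeil n r - 1)
        ++ List.replicate (r - (r * pvCeil n r - n)).toNat (pvCeil n r) := by
  set m := pvCeil n r with hm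
  obtain ⟨hlo, hhi⟩ := pvCeil_bounds n r hr
  set e : Int := r * m - n with he
  have he0 : 0 ≤ e := by nlinarith
  have her : e < r := by nlinarith
  have hbuild : (PySem.List.pyRange 0 r 1).foldl (fun acc _ => acc ++ [m]) []
      = List.replicate r.toNat m := by
    rw [foldl_append_replicate]
    simp [PySem.List.length_pyRange_one]
  rw [hbuild]
  have hrepl0 : List.replicate r.toNat m
      = List.replicate 0 (m - 1) ++ List.replicate (r.toNat - 0) m := by simp
  rw [hrepl0]
  have h1 : e.toNat + 0 ≤ r.toNat := by omega
  have h2 : (r.toNat : Int) * m - n = ((e.toNat + 0 : Nat) : Int) := by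
    have : (r.toNat : Int) = r := by omega
    rw [this]; omega
  rw [getRowsWhile_eq n m e.toNat 0 r.toNat h1 h2]
  rw [sorted_two_blocks]
  congr 2; omega

-- in the third branch num_rows = ceil(n/5) is positive (n ≥ 11)
theorem numRows_pos_of_gt10 (n : Int) (h : ¬ n ≤ 10) : 0 < pvCeil n 5 := by
  obtain ⟨hlo, hhi⟩ := pvCeil_bounds n 5 (by norm_num)
  nlinarith

-- ===== VERDICT (by name: the statement is the Claim_ definition above) =====
theorem getRows_spec : Claim_equal_getRows := by
  intro n _
  unfold Spec_getRows getRows getRows_alt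
  by_cases h4 : n ≤ 4
  · simp only [if_pos h4]
    exact getRows_core n 1 (by norm_num)
  · by_cases h10 : n ≤ 10
    · simp only [if_neg h4, if_pos h10]
      exact getRows_core n 2 (by norm_num)
    · simp only [if_neg h4, if_neg h10]
      exact getRows_core n (pvCeil n 5) (numRows_pos_of_gt10 n h10)
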